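-- pv_equiv track=rewrite | github.com/dadapilot/Problems-from-BIOinf | genome assembly as shortest Superstring _ opt.py | join_string
-- ===== SOURCE A (Python) =====
-- def join_string(L):
--     a=0
--     M=[]
--     for id, elem in enumerate(L):
--         if elem.isalnum() is not True:
--             a=0
--             M.append(elem)
--         else:
--             a+=1
--             if a>1:
--                 M[len(M)-1]=M[len(M)-1]+elem
--             else: M.append(elem)
--     return M
-- ===== SOURCE B (Python) =====
-- from itertools import groupby
--
-- def join_string(L):
--     M = []
--     for is_alnum, group in groupby(L, key=lambda x: x.isalnum()):
--         if is_alnum: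
--             M.append(''.join(group))
--         else:
--             M.extend(group)
--     return M
-- ===== Notes on version B (the rewrite author's own statement) =====
-- stated objective: faster
-- what changed: B splits the list into maximal consecutive runs of same isalnum-status with itertools.groupby and joins each alnum run with one ''.join, instead of A's per-element counter that repeatedly re-concatenates onto the last output element (quadratic in the length of an alnum run).
import Mathlib
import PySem

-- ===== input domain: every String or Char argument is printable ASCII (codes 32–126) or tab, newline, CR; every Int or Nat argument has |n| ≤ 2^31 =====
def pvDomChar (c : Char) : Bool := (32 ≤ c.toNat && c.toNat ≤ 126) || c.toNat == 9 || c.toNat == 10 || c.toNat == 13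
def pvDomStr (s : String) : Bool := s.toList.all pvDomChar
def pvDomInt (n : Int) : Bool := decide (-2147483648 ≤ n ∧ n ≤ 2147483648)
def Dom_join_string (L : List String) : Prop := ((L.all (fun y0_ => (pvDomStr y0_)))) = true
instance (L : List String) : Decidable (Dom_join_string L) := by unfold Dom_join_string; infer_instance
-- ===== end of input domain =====

-- B replaces A's per-element counter (which rewrites the last output element) by a run-based
-- decomposition (groupby on isalnum status): each maximal alnum run is joined with a single join (A re-concatenates onto the last element per step). Objective: faster (measured).


-- ===== PORT A =====
-- loop state: counter a and output M; 'M[len(M)-1] = M[len(M)-1]+elem' is ported as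
-- set/getD at index M.length-1 (in range whenever the a>1 branch runs, since a>1
-- implies a previous append, so this is exact on every reachable state).
def joinLoopA : List String → Int → List String → List String
  | [], _, M => M
  | e :: rest, a, M =>
    if !(PySem.Str.strIsalnum e) then
      joinLoopA rest 0 (M ++ [e])
    else
      if a + 1 > 1 then
        joinLoopA rest (a + 1) (M.set (M.length - 1) (M.getD (M.length - 1) "" ++ e))
      else
        joinLoopA rest (a + 1) (M ++ [e])

def join_string (L : List String) : List String := joinLoopA L 0 []

-- ===== PORT B =====
-- groupby(L, key=lambda x: x.isalnum()): a maximal alnum run starting at x is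
-- x :: takeWhile isalnum xs, emitted as ''.join(group); each element of a
-- non-alnum group is emitted on its own.
def join_string_alt : List String → List String
  | [] => []
  | x :: xs =>
    if PySem.Str.strIsalnum x then
      PySem.Str.join "" (x :: xs.takeWhile PySem.Str.strIsalnum)
        :: join_string_alt (xs.dropWhile PySem.Str.strIsalnum)
    else
      x :: join_string_alt xs
termination_by L => L.length
decreasing_by
  · simpa using Nat.lt_succ_of_le (List.length_dropWhile_le _ _)
  · simp

-- ===== PRECONDITION & SPEC =====
def Spec_join_string (L : List String) (out : List String) : Prop := out = join_string_alt L
instance (L : List String) (out : List String) : Decidable (Spec_join_string L out) := by unfold Spec_join_string; infer_instance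

-- ===== CLAIM (what is proved, stated in full; the proofs are below) =====
def Claim_equal_join_string : Prop := ∀ (L : List String), Dom_join_string L → Spec_join_string L (join_string L)

-- ===== LEMMAS AND PROOFS =====

theorem str_join_cons (x : String) (l : List String) :
    PySem.Str.join "" (x :: l) = x ++ PySem.Str.join "" l := by
  cases l with
  | nil => simp [PySem.Str.join, PySem.Chars.join, List.intercalate]
  | cons b t => simp [PySem.Str.join, PySem.Chars.join_cons_cons]

-- the mutual characterisation of A's loop: started fresh (a = 0) it appends B's result
-- to M; started inside an alnum run (a ≥ 1, last output element s) it extends s with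
-- the rest of the run and continues with B on the remainder.
theorem joinLoopA_spec (n : ℕ) :
    ∀ xs : List String, xs.length = n →
      ((∀ M, joinLoopA xs 0 M = M ++ join_string_alt xs) ∧
       (∀ (a : Int) (M : List String) (s : String), 1 ≤ a →
          joinLoopA xs a (M ++ [s]) =
            (M ++ [s ++ PySem.Str.join "" (xs.takeWhile PySem.Str.strIsalnum)]) ++
              join_string_alt (xs.dropWhile PySem.Str.strIsalnum))) := by
  induction n with
  | zero =>
    intro xs hxs
    rw [List.length_eq_zero_iff] at hxs
    subst hxs
    refine ⟨fun M => by simp [joinLoopA, join_string_alt], ?_⟩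
    intro a M s ha
    simp [joinLoopA, join_string_alt, PySem.Str.join, PySem.Chars.join, List.intercalate]
  | succ n ih =>
    intro xs hxs
    cases xs with
    | nil => simp at hxs
    | cons x t =>
      have ht : t.length = n := by simpa using hxs
      constructor
      · intro M
        by_cases hx : PySem.Str.strIsalnum x
        · have hxc : PySem.Chars.strIsalnum x.toList = true := by simpa using hx
          have h1 : joinLoopA (x :: t) 0 M = joinLoopA t 1 (M ++ [x]) := by
            simp [joinLoopA, hxc]
          rw [h1, (ih t ht).2 1 M x le_rfl]
          rw [join_string_alt, if_pos hx, str_join_cons]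
          simp
        · have hxc : PySem.Chars.strIsalnum x.toList = false := by simpa using hx
          have h1 : joinLoopA (x :: t) 0 M = joinLoopA t 0 (M ++ [x]) := by
            simp [joinLoopA, hxc]
          rw [h1, (ih t ht).1 (M ++ [x]), join_string_alt, if_neg hx]
          simp
      · intro a M s ha
        by_cases hx : PySem.Str.strIsalnum x
        · have hxc : PySem.Chars.strIsalnum x.toList = true := by simpa using hx
          have hgt : a + 1 > 1 := by omega
          have hset : (M ++ [s]).set ((M ++ [s]).length - 1)
              ((M ++ [s]).getD ((M ++ [s]).length - 1) "" ++ x) = M ++ [s ++ x] := by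
            simp [List.getD]
          have h1 : joinLoopA (x :: t) a (M ++ [s]) = joinLoopA t (a + 1) (M ++ [s ++ x]) := by
            rw [joinLoopA]
            rw [if_neg (by simp [hxc]), if_pos (by simpa using hgt), hset]
          rw [h1, (ih t ht).2 (a + 1) M (s ++ x) (by omega)]
          rw [List.takeWhile_cons_of_pos hx, List.dropWhile_cons_of_pos hx, str_join_cons]
          simp [String.append_assoc]
        · have hxc : PySem.Chars.strIsalnum x.toList = false := by simpa using hx
          have h1 : joinLoopA (x :: t) a (M ++ [s]) = joinLoopA t 0 ((M ++ [s]) ++ [x]) := by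
            simp [joinLoopA, hxc]
          rw [h1, (ih t ht).1 ((M ++ [s]) ++ [x])]
          rw [List.takeWhile_cons_of_neg (by simpa using hxc), List.dropWhile_cons_of_neg (by simpa using hxc)]
          rw [join_string_alt, if_neg hx]
          simp [PySem.Str.join, PySem.Chars.join, List.intercalate]

-- ===== VERDICT (by name: the statement is the Claim_ definition above) =====
theorem join_string_spec : Claim_equal_join_string := by
  intro L _
  unfold Spec_join_string join_string
  simpa using ((joinLoopA_spec L.length L rfl).1 [])
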